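-- pv_equiv track=rewrite | github.com/leonsolon/coding-challenges | codility/lesson06/triangle/guilherme.py | solution
-- ===== SOURCE A (Python) =====
-- def solution(A):
--     len_A = len(A)
--     if len_A<3:
--         return 0
--     if max(A)<0:
--         return 0
--
--     sorted_A = sorted(A)
--     sorted_positive_A = []
--     for i, a in enumerate(sorted_A):
--         if a>=0:
--             sorted_positive_A = sorted_A[i:]
--             break
--
--     len_sorted_positive_A = len(sorted_positive_A)
--     if len_sorted_positive_A<3:
--         return 0
--
--     for i,a in enumerate(sorted_positive_A):
--         if i> 0 and i<len_sorted_positive_A-1: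
--             max_part_1 = max(sorted_positive_A[0:i])
--             min_part_2 = min(sorted_positive_A[i+1:])
--             if a > min_part_2 - max_part_1:
--                 return 1
--
--     return 0
-- ===== SOURCE B (Python) =====
-- def solution(A):
--     s = sorted(A)
--     for x, y, z in zip(s, s[1:], s[2:]):
--         if x > z - y:
--             return 1
--     return 0
-- ===== Notes on version B (the rewrite author's own statement) =====
-- stated objective: simpler
-- what changed: B sorts once and scans consecutive triples (x,y,z) for x+y>z, replacing A's non-negative-suffix extraction and per-index recomputation of max(prefix)/min(suffix).
import Mathlib
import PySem

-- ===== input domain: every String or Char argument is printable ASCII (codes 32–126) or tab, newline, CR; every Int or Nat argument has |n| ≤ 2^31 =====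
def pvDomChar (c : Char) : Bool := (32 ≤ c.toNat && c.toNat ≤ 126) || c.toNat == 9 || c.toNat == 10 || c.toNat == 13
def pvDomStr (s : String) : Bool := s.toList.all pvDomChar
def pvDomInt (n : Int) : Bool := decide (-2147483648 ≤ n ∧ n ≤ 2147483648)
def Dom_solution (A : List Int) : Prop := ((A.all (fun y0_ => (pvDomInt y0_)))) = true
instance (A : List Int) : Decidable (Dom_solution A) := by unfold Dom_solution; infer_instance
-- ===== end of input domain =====

-- B sorts once and checks only consecutive triples, instead of A's per-index max(prefix)/min(suffix) rescans.

-- ===== PORT A =====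
-- 'for i,a in enumerate(sorted_A): if a>=0: sorted_positive_A = sorted_A[i:]; break'
-- (at index i the slice sorted_A[i:] is the current element followed by the remaining elements)
def pvLoop1 : List Int → List Int
  | [] => []
  | a :: rest => if 0 ≤ a then a :: rest else pvLoop1 rest

-- the second 'for i,a in enumerate(sorted_positive_A)' loop; sp[0:i] = sp.take i and
-- sp[i+1:] = sp.drop (i+1) (natural in-range bounds, exactly Python's slices here);
-- the none/none match arm is unreachable: under the guard both slices are nonempty.
def pvLoop2 (sp : List Int) : Nat → List Int → Int
  | _, [] => 0
  | i, a :: rest =>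
    if 0 < i ∧ i < sp.length - 1 then
      match PySem.List.max? (sp.take i) (fun x => x), PySem.List.min? (sp.drop (i+1)) (fun x => x) with
      | some mx, some mn => if mn - mx < a then 1 else pvLoop2 sp (i+1) rest
      | _, _ => 0
    else pvLoop2 sp (i+1) rest

def solution (A : List Int) : Int :=
  let lenA := A.length
  if lenA < 3 then 0
  else
    match PySem.List.max? A (fun x => x) with
    | none => 0   -- unreachable: Python's max(A) with len(A) ≥ 3 never raises
    | some m =>
      if m < 0 then 0
      else
        let sortedA := PySem.List.sorted A (fun x => x) false
        let sp := pvLoop1 sortedA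
        if sp.length < 3 then 0
        else pvLoop2 sp 0 sp

-- ===== PORT B =====
-- 'for x, y, z in zip(s, s[1:], s[2:]): if x > z - y: return 1'
def pvScan : List Int → Int
  | x :: y :: z :: rest => if z - y < x then 1 else pvScan (y :: z :: rest)
  | _ => 0

def solution_alt (A : List Int) : Int :=
  pvScan (PySem.List.sorted A (fun x => x) false)

-- ===== PRECONDITION & SPEC =====
def Spec_solution (A : List Int) (out : Int) : Prop := out = solution_alt A
instance (A : List Int) (out : Int) : Decidable (Spec_solution A out) := by unfold Spec_solution; infer_instance

-- ===== CLAIM (what is proved, stated in full; the proofs are below) =====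
def Claim_equal_solution : Prop := ∀ (A : List Int), Dom_solution A → Spec_solution A (solution A)

-- ===== LEMMAS AND PROOFS =====

lemma pvScan_short (s : List Int) (h : s.length < 3) : pvScan s = 0 := by
  match s with
  | [] => rfl
  | [_] => rfl
  | [_, _] => rfl
  | _ :: _ :: _ :: _ => simp at h; omega

lemma pvLoop1_sublist (s : List Int) : (pvLoop1 s).Sublist s := by
  induction s with
  | nil => simp [pvLoop1]
  | cons a rest ih =>
    simp only [pvLoop1]
    split
    · exact List.Sublist.refl _
    · exact ih.cons a

lemma pvLoop1_nil_of_neg (s : List Int) (h : ∀ x ∈ s, x < 0) : pvLoop1 s = [] := by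
  induction s with
  | nil => rfl
  | cons a rest ih =>
    have ha := h a (by simp)
    simp only [pvLoop1, if_neg (by omega : ¬ (0 ≤ a))]
    exact ih (fun x hx => h x (by simp [hx]))

-- skipping the negative prefix does not change the scan on a sorted list
lemma pvScan_loop1 (s : List Int) (hp : s.Pairwise (· ≤ ·)) : pvScan s = pvScan (pvLoop1 s) := by
  induction s with
  | nil => rfl
  | cons a rest ih =>
    simp only [pvLoop1]
    by_cases ha : 0 ≤ a
    · simp [ha]
    · simp only [if_neg ha]
      have hrest : rest.Pairwise (· ≤ ·) := hp.of_cons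
      rw [← ih hrest]
      match rest, hp with
      | [], _ => rfl
      | [y], _ => rfl
      | y :: z :: r, hp =>
        have hyz : y ≤ z := (List.pairwise_cons.1 hp.of_cons).1 z (by simp)
        simp only [pvScan, if_neg (by omega : ¬ (z - y < a))]

lemma foldl_min_of_le (t : List Int) (x : Int) (h : ∀ y ∈ t, x ≤ y) : t.foldl min x = x := by
  induction t generalizing x with
  | nil => rfl
  | cons y t ih =>
    simp only [List.foldl_cons, min_eq_left (h y (by simp))]
    exact ih x (fun z hz => h z (by simp [hz]))

lemma foldl_max_getLast (t : List Int) (x : Int) (hp : (x :: t).Pairwise (· ≤ ·)) :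
    t.foldl max x = (x :: t).getLast (by simp) := by
  induction t generalizing x with
  | nil => rfl
  | cons y t ih =>
    have hxy : x ≤ y := (List.pairwise_cons.1 hp).1 y (by simp)
    simp only [List.foldl_cons, max_eq_right hxy]
    rw [List.getLast_cons (by simp)]
    exact ih y hp.of_cons

lemma sorted_max_take (sp : List Int) (i : Nat) (hp : sp.Pairwise (· ≤ ·))
    (h1 : 1 ≤ i) (h2 : i ≤ sp.length) (hlt : i - 1 < sp.length) :
    PySem.List.max? (sp.take i) (fun x => x) = some sp[i-1] := by
  have hlen : (sp.take i).length = i := by simp [h2]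
  match hs : sp.take i, hlen with
  | x :: t, hlen =>
    rw [PySem.List.max?_id_cons]
    have hpt : (x :: t).Pairwise (· ≤ ·) := hs ▸ (hp.sublist (List.take_sublist i sp))
    rw [foldl_max_getLast t x hpt]
    congr 1
    have := List.getLast_eq_getElem (l := x :: t) (by simp)
    rw [this]
    have hlen' : (x :: t).length = i := hlen
    have : (x :: t)[(x :: t).length - 1] = (sp.take i)[i - 1]'(by rw [hs]; omega) := by
      congr 1 <;> simp [hs, hlen']
    rw [this, List.getElem_take]
  | [], hlen => simp at hlen; omega

lemma sorted_min_drop (sp : List Int) (i : Nat) (hp : sp.Pairwise (· ≤ ·)) (hi : i < sp.length) :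
    PySem.List.min? (sp.drop i) (fun x => x) = some sp[i] := by
  rw [List.drop_eq_getElem_cons hi, PySem.List.min?_id_cons]
  congr 1
  apply foldl_min_of_le
  intro y hy
  have hpd : (sp.drop i).Pairwise (· ≤ ·) := hp.sublist (List.drop_sublist i sp)
  rw [List.drop_eq_getElem_cons hi] at hpd
  exact (List.pairwise_cons.1 hpd).1 y hy

-- the core invariant: from index i ≥ 1 on, A's loop equals B's consecutive-triple scan
lemma pvLoop2_eq_pvScan (k : Nat) : ∀ (sp : List Int), sp.Pairwise (· ≤ ·) →
    ∀ i, 1 ≤ i → sp.length - i ≤ k → pvLoop2 sp i (sp.drop i) = pvScan (sp.drop (i-1)) := by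
  induction k with
  | zero =>
    intro sp hp i h1 hk
    have hd : sp.drop i = [] := List.drop_eq_nil_iff.2 (by omega)
    rw [hd]
    have : (sp.drop (i-1)).length < 3 := by
      simp only [List.length_drop]; omega
    rw [pvScan_short _ this]; rfl
  | succ k ih =>
    intro sp hp i h1 hk
    match hd : sp.drop i with
    | [] =>
      have : (sp.drop (i-1)).length < 3 := by
        have := List.drop_eq_nil_iff.1 hd
        simp only [List.length_drop]; omega
      rw [pvScan_short _ this]; rfl
    | a :: rest =>
      have hilen : i < sp.length := by
        by_contra h
        rw [List.drop_eq_nil_of_le (by omega)] at hd; simp at hd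
      have hcons := List.drop_eq_getElem_cons hilen
      rw [hd] at hcons
      injection hcons with ha hrest
      subst ha
      by_cases hmid : i < sp.length - 1
      · -- middle index: the guard holds, both slices nonempty
        simp only [pvLoop2]
        rw [if_pos (show 0 < i ∧ i < sp.length - 1 from ⟨h1, hmid⟩),
            sorted_max_take sp i hp h1 (by omega) (by omega),
            sorted_min_drop sp (i+1) hp (by omega)]
        have hdrop : sp.drop (i-1) = sp[i-1] :: sp[i] :: sp[i+1] :: sp.drop (i+2) := by
          rw [List.drop_eq_getElem_cons (show i-1 < sp.length by omega)]
          have h2 : i - 1 + 1 = i := by omega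
          rw [h2, List.drop_eq_getElem_cons hilen,
              List.drop_eq_getElem_cons (show i+1 < sp.length by omega)]
        show (if sp[i+1] - sp[i-1] < sp[i] then (1 : Int) else pvLoop2 sp (i+1) rest)
              = pvScan (sp.drop (i-1))
        by_cases hc : sp[i+1] - sp[i-1] < sp[i]
        · rw [if_pos hc, hdrop]
          simp only [pvScan]
          rw [if_pos (by omega : sp[i+1] - sp[i] < sp[i-1])]
        · rw [if_neg hc, hrest,
              ih sp hp (i+1) (by omega) (by omega)]
          have hdi : sp.drop (i+1-1) = sp[i] :: sp[i+1] :: sp.drop (i+2) := by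
            have h0 : i + 1 - 1 = i := by omega
            rw [h0, List.drop_eq_getElem_cons hilen,
                List.drop_eq_getElem_cons (show i+1 < sp.length by omega)]
          rw [hdi, hdrop]
          simp only [pvScan]
          rw [if_neg (by omega : ¬ (sp[i+1] - sp[i] < sp[i-1]))]
      · -- last index: the guard fails, remaining scan is too short on both sides
        simp only [pvLoop2, if_neg (by omega : ¬ (0 < i ∧ i < sp.length - 1))]
        have hr : rest = [] := by
          rw [hrest]; exact List.drop_eq_nil_iff.2 (by omega)
        rw [hr]
        have : (sp.drop (i-1)).length < 3 := by
          simp only [List.length_drop]; omega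
        rw [pvScan_short _ this]; rfl

lemma pvLoop2_start (sp : List Int) (hp : sp.Pairwise (· ≤ ·)) (h3 : 3 ≤ sp.length) :
    pvLoop2 sp 0 sp = pvScan sp := by
  match hs : sp, h3 with
  | a :: rest, h3 =>
    simp only [pvLoop2]
    rw [if_neg (by omega : ¬ (0 < 0 ∧ 0 < (a :: rest).length - 1))]
    show pvLoop2 (a :: rest) 1 ((a :: rest).drop 1) = pvScan (a :: rest)
    rw [pvLoop2_eq_pvScan ((a :: rest).length) (a :: rest) hp 1 (by omega) (by omega)]
    rfl

-- ===== VERDICT (by name: the statement is the Claim_ definition above) =====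
theorem solution_spec : Claim_equal_solution := by
  intro A _
  unfold Spec_solution solution solution_alt
  set s := PySem.List.sorted A (fun x => x) false with hs
  have hps : s.Pairwise (· ≤ ·) := PySem.List.sorted_pairwise A (fun x => x)
  have hlen : s.length = A.length := PySem.List.length_sorted A (fun x => x) false
  by_cases h3 : A.length < 3
  · rw [if_pos h3, pvScan_short s (by omega)]
  · rw [if_neg h3]
    match hm : PySem.List.max? A (fun x => x) with
    | none =>
      exfalso
      have := (PySem.List.max?_eq_none_iff A (fun x => x)).1 hm
      simp [this] at h3
    | some m =>
      show (if m < 0 then (0 : Int)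
            else if (pvLoop1 s).length < 3 then 0 else pvLoop2 (pvLoop1 s) 0 (pvLoop1 s))
           = pvScan s
      by_cases hneg : m < 0
      · rw [if_pos hneg]
        have hall : ∀ x ∈ s, x < 0 := by
          intro x hx
          have hxA : x ∈ A := (PySem.List.mem_sorted A (fun x => x) false x).1 hx
          have := PySem.List.max?_isMax hm x hxA
          simp at this; omega
        rw [pvScan_loop1 s hps, pvLoop1_nil_of_neg s hall]
        rfl
      · rw [if_neg hneg]
        by_cases hsp3 : (pvLoop1 s).length < 3
        · rw [if_pos hsp3, pvScan_loop1 s hps, pvScan_short _ hsp3]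
        · rw [if_neg hsp3, pvScan_loop1 s hps,
              pvLoop2_start _ (hps.sublist (pvLoop1_sublist s)) (by omega)]
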